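-- pv_equiv track=rewrite | github.com/ValentinKlinger/prologin | qualification_2024/escalade_de_Yggdrasil.py | le_plus_grand_saut
-- ===== SOURCE A (Python) =====
-- def le_plus_grand_saut(n: int, differences: list[int]) -> int:
--     """
--     :param n: le nombre de branches de l'arbre moins 1
--     :param differences: la liste des différences en hauteur des branches consécutives
--
--     >>> le_plus_grand_saut(4, [3, 2, -5, 4])
--     3
--     >>> le_plus_grand_saut(7, [2, 9, 18, 12, 9, 19, 1])
--     19
--     >>> le_plus_grand_saut(6, [1, 6, -7, 9, 10, -15])
--     10
--     >>> le_plus_grand_saut(4, [-2, -9, 10, -3])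
--     0
--     >>> le_plus_grand_saut(1, [2])
--     2
--     >>> le_plus_grand_saut(4, [2, 9, -15, 30])
--     30
--     """
--     hauteurs = [1]
--     for difference in range(len(differences)):
--         hauteurs.append(hauteurs[difference] + differences[difference])
--
--     plus_haute_branche = hauteurs.index(max(hauteurs))
--
--     if plus_haute_branche == 0:
--         return 0
--     return max(differences[: plus_haute_branche + 1])
-- ===== SOURCE B (Python) =====
-- def le_plus_grand_saut(n: int, differences: list[int]) -> int:
--     # One forward pass: running height, online first-argmax of the heights,
--     # running max of the differences, and the answer finalized on the fly.
--     h = 1        # current height (prefix sum starting at 1)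
--     best = 1     # highest branch height seen so far
--     k = 0        # first index (in the heights sequence) where `best` occurred
--     m = 0        # max(differences[0..i]) while scanning
--     ans = 0      # max(differences[:k+1]) for the current k
--     for i, d in enumerate(differences):
--         m = d if i == 0 else max(m, d)
--         if k == i:       # the slice differences[:k+1] reaches d: extend ans
--             ans = m
--         h += d
--         if h > best:
--             best, k = h, i + 1
--             ans = m
--     return ans if k > 0 else 0
-- ===== Notes on version B (the rewrite author's own statement) =====
-- stated objective: alternative
-- what changed: Replaces A's build-the-full-heights-list then max()/.index()/slice-and-max decomposition by a single forward pass that maintains the running height, the online first-argmax, and the running slice-maximum, so no intermediate list is built and the input is traversed once instead of four times.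
import Mathlib
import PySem

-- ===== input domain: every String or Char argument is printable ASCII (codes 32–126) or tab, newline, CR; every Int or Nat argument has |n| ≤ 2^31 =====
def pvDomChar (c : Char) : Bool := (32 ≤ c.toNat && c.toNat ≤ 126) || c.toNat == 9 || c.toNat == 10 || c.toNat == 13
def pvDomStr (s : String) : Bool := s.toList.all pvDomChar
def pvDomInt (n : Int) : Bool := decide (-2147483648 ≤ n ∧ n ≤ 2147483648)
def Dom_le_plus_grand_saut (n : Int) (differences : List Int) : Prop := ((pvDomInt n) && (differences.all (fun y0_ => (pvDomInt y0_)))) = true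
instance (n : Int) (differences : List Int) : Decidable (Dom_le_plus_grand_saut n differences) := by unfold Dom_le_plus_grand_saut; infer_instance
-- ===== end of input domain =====

-- B replaces A's build-heights-list / max / index / slice-max pipeline by one forward pass
-- (running height, online first-argmax, running slice maximum) with O(1) extra space.


-- ===== PORT A =====
-- hauteurs = [1]; for difference in range(len(differences)): hauteurs.append(hauteurs[difference] + differences[difference])
-- indices are always in range, so pyGetD's default 0 is never used.
def le_plus_grand_saut (n : Int) (differences : List Int) : Int :=
  let hauteurs := (PySem.List.pyRange 0 (differences.length : Int) 1).foldl
    (fun hs d => hs ++ [PySem.List.pyGetD hs d 0 + PySem.List.pyGetD differences d 0]) [1]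
  match PySem.List.max? hauteurs (fun x => x) with
  | none => 0      -- unreachable: hauteurs starts as [1]
  | some m =>
    match PySem.List.index? hauteurs m with
    | none => 0    -- unreachable: m is an element of hauteurs
    | some plus_haute_branche =>
      if plus_haute_branche = 0 then 0
      else
        match PySem.List.max? (PySem.List.slice differences none (some ((plus_haute_branche : Int) + 1))) (fun x => x) with
        | none => 0  -- unreachable: the slice is nonempty when plus_haute_branche ≥ 1
        | some r => r

-- ===== PORT B =====
-- state (h, best, k, m, ans) exactly as in Source B's loop over enumerate(differences)
def le_plus_grand_saut_alt (n : Int) (differences : List Int) : Int :=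
  let st := (PySem.List.enumerate differences).foldl
    (fun (st : Int × Int × Int × Int × Int) (p : Int × Int) =>
      let h := st.1; let best := st.2.1; let k := st.2.2.1
      let m0 := st.2.2.2.1; let ans0 := st.2.2.2.2
      let i := p.1; let d := p.2
      let m := if i == 0 then d else max m0 d
      let ans := if k == i then m else ans0
      let h' := h + d
      if best < h' then (h', h', i + 1, m, m) else (h', best, k, m, ans))
    (1, 1, 0, 0, 0)
  if st.2.2.1 > 0 then st.2.2.2.2 else 0

-- ===== PRECONDITION & SPEC =====
def Spec_le_plus_grand_saut (n : Int) (differences : List Int) (out : Int) : Prop := out = le_plus_grand_saut_alt n differences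
instance (n : Int) (differences : List Int) (out : Int) : Decidable (Spec_le_plus_grand_saut n differences out) := by unfold Spec_le_plus_grand_saut; infer_instance

-- ===== CLAIM (what is proved, stated in full; the proofs are below) =====
def Claim_equal_le_plus_grand_saut : Prop := ∀ (n : Int) (differences : List Int), Dom_le_plus_grand_saut n differences → Spec_le_plus_grand_saut n differences (le_plus_grand_saut n differences)

-- ===== LEMMAS AND PROOFS =====

-- the list of heights A builds: pvScan h ds = [h, h+d0, h+d0+d1, …]
def pvScan : Int → List Int → List Int
  | h, [] => [h]
  | h, d :: ds => h :: pvScan (h + d) ds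

-- Python max() with sentinel 0 for the empty list (never used on [])
def pvMax : List Int → Int
  | [] => 0
  | x :: xs => xs.foldl max x

def pvH (ds : List Int) : Int := 1 + ds.sum
def pvM (ds : List Int) : Int := pvMax (pvScan 1 ds)
def pvK (ds : List Int) : Nat := (pvScan 1 ds).idxOf (pvM ds)
def pvAns (ds : List Int) : Int := pvMax (ds.take (pvK ds + 1))

theorem pvScan_ne_nil (h : Int) (ds : List Int) : pvScan h ds ≠ [] := by
  cases ds <;> simp [pvScan]

theorem length_pvScan (h : Int) (ds : List Int) : (pvScan h ds).length = ds.length + 1 := by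
  induction ds generalizing h with
  | nil => simp [pvScan]
  | cons d ds ih => simp [pvScan, ih]

theorem pvScan_append (h : Int) (xs : List Int) (d : Int) :
    pvScan h (xs ++ [d]) = pvScan h xs ++ [h + xs.sum + d] := by
  induction xs generalizing h with
  | nil => simp [pvScan]
  | cons x xs ih => simp [pvScan, ih, add_assoc]

theorem pvScan_getD_length (h : Int) (xs : List Int) :
    (pvScan h xs).getD xs.length 0 = h + xs.sum := by
  induction xs generalizing h with
  | nil => simp [pvScan]
  | cons x xs ih => simpa [pvScan, add_assoc] using ih (h + x)

theorem le_pvMax (xs : List Int) (y : Int) (hy : y ∈ xs) : y ≤ pvMax xs := by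
  cases xs with
  | nil => cases hy
  | cons x xs =>
    rcases List.mem_cons.mp hy with rfl | hy
    · exact (PySem.List.le_foldl_max xs y).1
    · exact (PySem.List.le_foldl_max xs x).2 y hy

theorem pvMax_mem (xs : List Int) (hxs : xs ≠ []) : pvMax xs ∈ xs := by
  cases xs with
  | nil => exact absurd rfl hxs
  | cons x xs =>
    rcases PySem.List.foldl_max_mem xs x with h | h
    · rw [pvMax, h]; exact List.mem_cons_self
    · exact List.mem_cons_of_mem x h

theorem pvMax_append_singleton (xs : List Int) (d : Int) (hxs : xs ≠ []) :
    pvMax (xs ++ [d]) = max (pvMax xs) d := by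
  cases xs with
  | nil => exact absurd rfl hxs
  | cons x xs => simp [pvMax, List.foldl_append]

theorem max?_eq_pvMax (xs : List Int) (hxs : xs ≠ []) :
    PySem.List.max? xs (fun x => x) = some (pvMax xs) := by
  cases hmx : PySem.List.max? xs (fun x => x) with
  | none => exact absurd ((PySem.List.max?_eq_none_iff xs _).mp hmx) hxs
  | some m =>
    have hm : m ∈ xs := PySem.List.max?_mem hmx
    have h1 : m ≤ pvMax xs := le_pvMax xs m hm
    have h2 : pvMax xs ≤ m := PySem.List.max?_isMax hmx (pvMax xs) (pvMax_mem xs hxs)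
    exact congrArg some (le_antisymm h1 h2)

theorem pvM_append (ds : List Int) (d : Int) :
    pvM (ds ++ [d]) = max (pvM ds) (pvH ds + d) := by
  unfold pvM
  rw [pvScan_append, pvMax_append_singleton _ _ (pvScan_ne_nil 1 ds)]
  rfl

theorem pvK_lt (ds : List Int) : pvK ds ≤ ds.length := by
  have hl := length_pvScan 1 ds
  have hmem : pvM ds ∈ pvScan 1 ds := pvMax_mem _ (pvScan_ne_nil 1 ds)
  have := List.idxOf_lt_length_of_mem hmem
  unfold pvK
  omega

theorem pvK_append (ds : List Int) (d : Int) :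
    pvK (ds ++ [d]) = if pvM ds < pvH ds + d then ds.length + 1 else pvK ds := by
  unfold pvK
  rw [pvScan_append, pvM_append]
  by_cases hlt : pvM ds < pvH ds + d
  · simp only [hlt, if_true, max_eq_right (le_of_lt hlt)]
    have hnot : pvH ds + d ∉ pvScan 1 ds := by
      intro hmem
      exact absurd (le_pvMax _ _ hmem) (not_le.mpr hlt)
    have h1 : pvH ds + d = 1 + ds.sum + d := by unfold pvH; ring
    rw [← h1, List.idxOf_append_of_notMem hnot]
    simp [length_pvScan]
  · simp only [hlt, if_false, max_eq_left (not_lt.mp hlt)]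
    exact List.idxOf_append_of_mem (pvMax_mem _ (pvScan_ne_nil 1 ds))

theorem enumerate_append_singleton (xs : List Int) (x : Int) (s : Int) :
    PySem.List.enumerate (xs ++ [x]) s = PySem.List.enumerate xs s ++ [(s + xs.length, x)] := by
  induction xs generalizing s with
  | nil => simp [PySem.List.enumerate_cons, PySem.List.enumerate_nil]
  | cons y ys ih =>
    simp only [List.cons_append, PySem.List.enumerate_cons, ih, List.length_cons]
    congr 2
    push_cast
    ring_nf

-- invariant of B's fold, proved by appending one element on the right
theorem foldB_eq (ds : List Int) :
    (PySem.List.enumerate ds).foldl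
      (fun (st : Int × Int × Int × Int × Int) (p : Int × Int) =>
        let h := st.1; let best := st.2.1; let k := st.2.2.1
        let m0 := st.2.2.2.1; let ans0 := st.2.2.2.2
        let i := p.1; let d := p.2
        let m := if i == 0 then d else max m0 d
        let ans := if k == i then m else ans0
        let h' := h + d
        if best < h' then (h', h', i + 1, m, m) else (h', best, k, m, ans))
      (1, 1, 0, 0, 0)
    = (pvH ds, pvM ds, (pvK ds : Int), pvMax ds, pvAns ds) := by
  induction ds using List.reverseRecOn with
  | nil => simp [PySem.List.enumerate_nil, pvH, pvM, pvK, pvMax, pvAns, pvScan]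
  | append_singleton ds d ih =>
    rw [enumerate_append_singleton, List.foldl_append, ih]
    simp only [List.foldl_cons, List.foldl_nil, zero_add]
    have hm' : (if ((ds.length : Int) == 0) = true then d else max (pvMax ds) d)
        = pvMax (ds ++ [d]) := by
      cases ds with
      | nil => simp [pvMax]
      | cons x xs =>
        have h0 : (((x :: xs).length : Int) == 0) = false := by
          simp
          omega
        rw [h0, pvMax_append_singleton _ _ (by simp)]
        rfl
    have hKle := pvK_lt ds
    have hsum : pvH ds + d = pvH (ds ++ [d]) := by
      unfold pvH
      simp only [List.sum_append, List.sum_cons, List.sum_nil]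
      omega
    rw [hm']
    by_cases hlt : pvM ds < pvH ds + d
    · simp only [hlt, if_true]
      have hM' : pvM (ds ++ [d]) = pvH ds + d := by
        rw [pvM_append]; exact max_eq_right (le_of_lt hlt)
      have hK' : pvK (ds ++ [d]) = ds.length + 1 := by rw [pvK_append]; simp [hlt]
      have hA' : pvAns (ds ++ [d]) = pvMax (ds ++ [d]) := by
        unfold pvAns
        rw [hK', List.take_of_length_le
          (by simp only [List.length_append, List.length_cons, List.length_nil]; omega)]
      rw [hM', hK', hA', hsum]
      norm_cast
    · simp only [hlt, if_false]
      have hM' : pvM (ds ++ [d]) = pvM ds := by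
        rw [pvM_append]; exact max_eq_left (not_lt.mp hlt)
      have hK' : pvK (ds ++ [d]) = pvK ds := by rw [pvK_append]; simp [hlt]
      have hA' : pvAns (ds ++ [d])
          = if ((pvK ds : Int) == (ds.length : Int)) = true then pvMax (ds ++ [d]) else pvAns ds := by
        unfold pvAns
        rw [hK']
        by_cases hKeq : pvK ds = ds.length
        · rw [hKeq, List.take_of_length_le (by simp)]
          simp
        · have hlen : pvK ds + 1 ≤ ds.length := by omega
          rw [List.take_append_of_le_length hlen]
          have : ((pvK ds : Int) == (ds.length : Int)) = false := by
            simp; omega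
          simp [this]
      rw [hM', hK', hA', hsum]

-- A's fold over range(len(differences)) builds pvScan 1 differences
theorem foldA_eq (ds : List Int) :
    (PySem.List.pyRange 0 (ds.length : Int) 1).foldl
      (fun hs d => hs ++ [PySem.List.pyGetD hs d 0 + PySem.List.pyGetD ds d 0]) [1]
    = pvScan 1 ds := by
  have key : ∀ j, j ≤ ds.length →
      (List.range j).foldl
        (fun (hs : List Int) (k : Nat) => hs ++ [PySem.List.pyGetD hs ((0:Int) + (k : Int)) 0
                            + PySem.List.pyGetD ds ((0:Int) + (k : Int)) 0]) [1]
      = pvScan 1 (ds.take j) := by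
    intro j
    induction j with
    | zero => intro _; simp [pvScan]
    | succ j ih =>
      intro hj
      rw [List.range_succ, List.foldl_append, ih (by omega)]
      simp only [List.foldl_cons, List.foldl_nil, zero_add, PySem.List.pyGetD_natCast]
      have hjlt : j < ds.length := by omega
      have h1 : (pvScan 1 (ds.take j)).getD j 0 = 1 + (ds.take j).sum := by
        have := pvScan_getD_length 1 (ds.take j)
        rwa [List.length_take_of_le (by omega)] at this
      have h2 : ds.getD j 0 = ds[j] := List.getD_eq_getElem ds 0 hjlt
      rw [h1, h2]
      have h3 : ds.take (j + 1) = ds.take j ++ [ds[j]] := by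
        rw [List.take_add_one, List.getElem?_eq_getElem hjlt]
        rfl
      rw [h3, pvScan_append]
  rw [PySem.List.pyRange_one]
  have h0 : (((ds.length : Int)) - 0).toNat = ds.length := by simp
  rw [h0, List.foldl_map]
  simpa using key ds.length le_rfl

theorem B_closed (n : Int) (ds : List Int) :
    le_plus_grand_saut_alt n ds = if (pvK ds : Int) > 0 then pvAns ds else 0 := by
  unfold le_plus_grand_saut_alt
  rw [foldB_eq]

theorem idxOf?_eq_some_idxOf {xs : List Int} {v : Int} (h : v ∈ xs) :
    List.idxOf? v xs = some (List.idxOf v xs) := by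
  have h1 : (PySem.List.index? xs v).isSome := (PySem.List.index?_isSome_iff xs v).mpr h
  rw [PySem.List.index?_eq_idxOf?] at h1
  obtain ⟨j, hj⟩ := Option.isSome_iff_exists.mp h1
  rw [hj, List.idxOf_eq_getD_idxOf?, hj]
  rfl

theorem take_pvK_ne_nil (ds : List Int) (hK : pvK ds ≠ 0) : ds.take (pvK ds + 1) ≠ [] := by
  have h1 := pvK_lt ds
  intro hnil
  rcases List.take_eq_nil_iff.mp hnil with h | h
  · omega
  · subst h
    exact hK (by simpa using h1)

-- ===== VERDICT (by name: the statement is the Claim_ definition above) =====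
theorem le_plus_grand_saut_spec : Claim_equal_le_plus_grand_saut := by
  intro n ds _
  unfold Spec_le_plus_grand_saut
  rw [B_closed]
  unfold le_plus_grand_saut
  simp only [foldA_eq]
  rw [max?_eq_pvMax _ (pvScan_ne_nil 1 ds)]
  have hidx : PySem.List.index? (pvScan 1 ds) (pvMax (pvScan 1 ds)) = some (pvK ds) := by
    rw [PySem.List.index?_eq_idxOf?,
        idxOf?_eq_some_idxOf (pvMax_mem _ (pvScan_ne_nil 1 ds))]
    rfl
  simp only [hidx]
  by_cases hK : pvK ds = 0
  · simp [hK]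
  · rw [if_neg hK]
    have hKpos : ((pvK ds : Nat) : Int) > 0 := by omega
    rw [if_pos hKpos]
    have hslice : PySem.List.slice ds none (some ((pvK ds : Int) + 1)) = ds.take (pvK ds + 1) := by
      have : ((pvK ds : Int) + 1) = ((pvK ds + 1 : Nat) : Int) := by push_cast; ring
      rw [this, PySem.List.slice_to_natCast]
    rw [hslice, max?_eq_pvMax _ (take_pvK_ne_nil ds hK)]
    rfl
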